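-- pv_equiv track=rewrite | github.com/jjlee740/sudoku-solver-python | sudoku-solver.py | check3x3Constraint
-- ===== SOURCE A (Python) =====
-- def check3x3Constraint(board, row, col):
--     """ Return true if the 3x3 constraint is not violated. """
--     # total of 9 3x3 boxes (quadrants) in a puzzle
--     # transform value such that 0-2 -> 0, 1-3 -> 1, 4-6 -> 2
--     currentXQuad = row // 3
--     currentYQuad = col // 3
--     currentQuadValues = []
--
--     for i in range(currentYQuad*3, (currentYQuad+1)*3):
--         for y in range(currentXQuad*3, (currentXQuad+1)*3):
--             if board[i][y] == 0:
--                 continue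
--             if board[i][y] not in currentQuadValues:
--                 currentQuadValues.append(board[i][y])
--             else:
--                 return False
--     return True
-- ===== SOURCE B (Python) =====
-- def check3x3Constraint(board, row, col):
--     """ Return true if the 3x3 constraint is not violated. """
--     currentXQuad = row // 3
--     currentYQuad = col // 3
--     values = [board[i][y]
--               for i in range(currentYQuad*3, (currentYQuad+1)*3)
--               for y in range(currentXQuad*3, (currentXQuad+1)*3)
--               if board[i][y] != 0]
--     return len(values) == len(set(values))
-- ===== Notes on version B (the rewrite author's own statement) =====
-- stated objective: simpler
-- what changed: Replaces the incremental membership-test loop with early return by a single comprehension collecting all non-zero box values followed by one aggregate duplicate check len(values) == len(set(values)).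
-- outside the precondition, e.g. on check3x3Constraint([[1, 1, 1]], 0, 0): A returns False, B raises IndexError
import Mathlib
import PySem

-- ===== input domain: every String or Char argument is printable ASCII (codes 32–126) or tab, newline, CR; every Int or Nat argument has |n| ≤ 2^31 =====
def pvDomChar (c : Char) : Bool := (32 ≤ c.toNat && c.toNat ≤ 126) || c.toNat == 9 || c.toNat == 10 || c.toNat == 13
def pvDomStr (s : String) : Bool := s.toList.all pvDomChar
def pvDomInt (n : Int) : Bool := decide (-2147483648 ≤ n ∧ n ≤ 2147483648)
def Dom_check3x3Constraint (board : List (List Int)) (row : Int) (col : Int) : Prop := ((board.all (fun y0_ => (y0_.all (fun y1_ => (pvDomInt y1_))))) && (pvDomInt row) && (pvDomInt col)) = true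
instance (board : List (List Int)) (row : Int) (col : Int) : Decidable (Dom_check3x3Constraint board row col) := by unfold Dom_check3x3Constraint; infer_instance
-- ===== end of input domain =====

-- B replaces A's incremental membership-test loop (with early return) by collecting the
-- non-zero box values in one comprehension and doing a single len(values) == len(set(values)) check.

-- ===== PORT A =====
-- inner 'for y in range(...)' loop of A: returns none when A executes 'return False'
def pvInnerA (rowL : List Int) (ys : List Int) (acc : List Int) : Option (List Int) :=
  match ys with
  | [] => some acc
  | y :: rest =>
    if PySem.List.pyGetD rowL y 0 = 0 then
      pvInnerA rowL rest acc
    else if PySem.List.pyGetD rowL y 0 ∉ acc then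
      pvInnerA rowL rest (acc ++ [PySem.List.pyGetD rowL y 0])
    else
      none

-- outer 'for i in range(...)' loop of A
def pvOuterA (board : List (List Int)) (xq : Int) (is : List Int) (acc : List Int) : Bool :=
  match is with
  | [] => true
  | i :: rest =>
    match pvInnerA (PySem.List.pyGetD board i [])
            (PySem.List.pyRange (xq * 3) ((xq + 1) * 3) 1) acc with
    | none => false
    | some acc' => pvOuterA board xq rest acc'

def check3x3Constraint (board : List (List Int)) (row : Int) (col : Int) : Bool :=
  let currentXQuad := PySem.Int.floordiv row 3
  let currentYQuad := PySem.Int.floordiv col 3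
  pvOuterA board currentXQuad
    (PySem.List.pyRange (currentYQuad * 3) ((currentYQuad + 1) * 3) 1) []

-- ===== PORT B =====
def check3x3Constraint_alt (board : List (List Int)) (row : Int) (col : Int) : Bool :=
  let currentXQuad := PySem.Int.floordiv row 3
  let currentYQuad := PySem.Int.floordiv col 3
  let values :=
    (PySem.List.pyRange (currentYQuad * 3) ((currentYQuad + 1) * 3) 1).flatMap (fun i =>
      ((PySem.List.pyRange (currentXQuad * 3) ((currentXQuad + 1) * 3) 1).map (fun y =>
          PySem.List.pyGetD (PySem.List.pyGetD board i []) y 0)).filter (fun v => v != 0))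
  decide (values.length = (PySem.Set.ofList values).length)

-- ===== PRECONDITION & SPEC =====
-- Pre_ excludes inputs on which some cell of the addressed 3x3 box is out of range: there
-- Python A raises IndexError, except when a duplicate occurs before the bad cell is reached,
-- in which case A exits early with False while B (which scans the whole box) raises.
def Pre_check3x3Constraint (board : List (List Int)) (row : Int) (col : Int) : Prop :=
  ∀ i ∈ PySem.List.pyRange (PySem.Int.floordiv col 3 * 3) ((PySem.Int.floordiv col 3 + 1) * 3) 1,
    PySem.Raise.InRange board.length i ∧
    ∀ y ∈ PySem.List.pyRange (PySem.Int.floordiv row 3 * 3) ((PySem.Int.floordiv row 3 + 1) * 3) 1,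
      PySem.Raise.InRange (PySem.List.pyGetD board i []).length y

instance (board : List (List Int)) (row : Int) (col : Int) : Decidable (Pre_check3x3Constraint board row col) := by unfold Pre_check3x3Constraint; infer_instance

def pvWitness_check3x3Constraint : List (List Int) × Int × Int :=
  ([[1, 2, 3], [4, 5, 0], [7, 8, 9]], 0, 0)

def Spec_check3x3Constraint (board : List (List Int)) (row : Int) (col : Int) (out : Bool) : Prop := out = check3x3Constraint_alt board row col
instance (board : List (List Int)) (row : Int) (col : Int) (out : Bool) : Decidable (Spec_check3x3Constraint board row col out) := by unfold Spec_check3x3Constraint; infer_instance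

-- ===== CLAIM (what is proved, stated in full; the proofs are below) =====
def Claim_equal_check3x3Constraint : Prop := ∀ (board : List (List Int)) (row : Int) (col : Int), Dom_check3x3Constraint board row col → Pre_check3x3Constraint board row col → Spec_check3x3Constraint board row col (check3x3Constraint board row col)

-- ===== LEMMAS AND PROOFS =====

-- A's inner loop computes exactly "append the non-zero row values; none iff a duplicate appears"
theorem pvInnerA_eq (rowL : List Int) (ys : List Int) : ∀ (acc : List Int), acc.Nodup →
    pvInnerA rowL ys acc =
      if (acc ++ (ys.map (fun y => PySem.List.pyGetD rowL y 0)).filter (fun v => v != 0)).Nodup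
      then some (acc ++ (ys.map (fun y => PySem.List.pyGetD rowL y 0)).filter (fun v => v != 0))
      else none := by
  induction ys with
  | nil => intro acc h; simp [pvInnerA, h]
  | cons y rest ih =>
    intro acc h
    by_cases h0 : PySem.List.pyGetD rowL y 0 = 0
    · simp [pvInnerA, h0, ih acc h]
    · by_cases hm : PySem.List.pyGetD rowL y 0 ∈ acc
      · have hnd : ¬ (acc ++ (PySem.List.pyGetD rowL y 0 ::
            (rest.map (fun y => PySem.List.pyGetD rowL y 0)).filter (fun v => v != 0))).Nodup := by
          intro hc
          rcases List.nodup_append.mp hc with ⟨_, _, hdis⟩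
          exact hdis _ hm _ (List.mem_cons_self ..) rfl
        simp [pvInnerA, h0, hm, hnd]
      · have h2 : (acc ++ [PySem.List.pyGetD rowL y 0]).Nodup := by
          simp only [List.nodup_append, List.nodup_singleton, true_and]
          refine ⟨h, fun a ha b hb => ?_⟩
          simp only [List.mem_singleton] at hb
          exact fun hab => hm ((hab.trans hb) ▸ ha)
        simp [pvInnerA, h0, hm, ih _ h2, List.append_assoc]

-- A's outer loop returns true iff the accumulated non-zero box values stay duplicate-free
theorem pvOuterA_eq (board : List (List Int)) (xq : Int) (is : List Int) :
    ∀ (acc : List Int), acc.Nodup →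
    pvOuterA board xq is acc =
      decide ((acc ++ is.flatMap (fun i =>
        ((PySem.List.pyRange (xq * 3) ((xq + 1) * 3) 1).map (fun y =>
            PySem.List.pyGetD (PySem.List.pyGetD board i []) y 0)).filter (fun v => v != 0))).Nodup) := by
  induction is with
  | nil => intro acc h; simp [pvOuterA, h]
  | cons i rest ih =>
    intro acc h
    rw [pvOuterA, pvInnerA_eq _ _ acc h]
    by_cases hnd : (acc ++ ((PySem.List.pyRange (xq * 3) ((xq + 1) * 3) 1).map (fun y =>
        PySem.List.pyGetD (PySem.List.pyGetD board i []) y 0)).filter (fun v => v != 0)).Nodup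
    · rw [if_pos hnd]
      simp only [ih _ hnd, List.flatMap_cons, List.append_assoc]
    · rw [if_neg hnd]
      symm
      simp only [List.flatMap_cons, ← List.append_assoc, decide_eq_false_iff_not]
      intro hc
      exact hnd (hc.sublist (List.sublist_append_left _ _))

theorem length_foldl_add_le (xs : List Int) : ∀ (s : List Int),
    (xs.foldl PySem.Set.add s).length ≤ s.length + xs.length := by
  induction xs with
  | nil => intro s; simp
  | cons x rest ih =>
    intro s
    rw [List.foldl_cons]
    have := ih (PySem.Set.add s x)
    have hlen : (PySem.Set.add s x).length ≤ s.length + 1 := by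
      by_cases hx : x ∈ s <;> simp [PySem.Set.add, hx]
    simp only [List.length_cons]
    omega

-- len(set) equals len on a Nodup start iff no duplicates were added
theorem foldl_add_length_iff (xs : List Int) : ∀ (s : List Int), s.Nodup →
    ((xs.foldl PySem.Set.add s).length = s.length + xs.length ↔ (s ++ xs).Nodup) := by
  induction xs with
  | nil => intro s h; simp [h]
  | cons x rest ih =>
    intro s h
    rw [List.foldl_cons]
    by_cases hx : x ∈ s
    · have hadd : PySem.Set.add s x = s := by simp [PySem.Set.add, hx]
      rw [hadd]
      have hle := length_foldl_add_le rest s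
      constructor
      · intro he
        exfalso
        simp only [List.length_cons] at he
        omega
      · intro hc
        rcases List.nodup_append.mp hc with ⟨_, _, hdis⟩
        exact absurd rfl (hdis _ hx _ (List.mem_cons_self ..))
    · have hadd : PySem.Set.add s x = s ++ [x] := by simp [PySem.Set.add, hx]
      have h2 : (s ++ [x]).Nodup := by
        simp only [List.nodup_append, List.nodup_singleton, true_and]
        refine ⟨h, fun a ha b hb => ?_⟩
        simp only [List.mem_singleton] at hb
        exact fun hab => hx ((hab.trans hb) ▸ ha)
      have hrw : s ++ x :: rest = (s ++ [x]) ++ rest := by simp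
      rw [hadd, hrw, ← ih _ h2]
      simp only [List.length_append, List.length_cons, List.length_nil]
      omega

theorem length_eq_ofList_iff (xs : List Int) :
    (xs.length = (PySem.Set.ofList xs).length) ↔ xs.Nodup := by
  rw [PySem.Set.ofList_eq_foldl]
  have h := foldl_add_length_iff xs [] List.nodup_nil
  simp only [List.length_nil, Nat.zero_add, List.nil_append] at h
  rw [← h]
  constructor <;> intro <;> omega

-- ===== VERDICT (by name: the statement is the Claim_ definition above) =====
theorem check3x3Constraint_spec : Claim_equal_check3x3Constraint := by
  unfold Claim_equal_check3x3Constraint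
  intro board row col _ _
  unfold Spec_check3x3Constraint check3x3Constraint check3x3Constraint_alt
  rw [pvOuterA_eq _ _ _ [] List.nodup_nil]
  simp only [List.nil_append, length_eq_ofList_iff]
  rfl
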